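-- pv_equiv track=rewrite | github.com/mhemeryck/aoc_2023 | day5/seeds.py | remap_seeds
-- ===== SOURCE A (Python) =====
-- import collections
-- import typing
--
-- SeedRange = collections.namedtuple("SeedRange", ("offset", "length"))
--
-- def remap_seeds(seeds: typing.List[int]) -> typing.List[SeedRange]:
--     result = []
--     offset, length = 0, 0
--     for n, seed in enumerate(seeds):
--         if n % 2 == 0:
--             offset = seed
--         else:
--             length = seed
--             result.append(SeedRange(offset=offset, length=length))
--
--     return result
-- ===== SOURCE B (Python) =====
-- import collections
-- import typing
--
-- SeedRange = collections.namedtuple("SeedRange", ("offset", "length"))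
--
-- def remap_seeds(seeds: typing.List[int]) -> typing.List[SeedRange]:
--     it = iter(seeds)
--     return [SeedRange(offset=a, length=b) for a, b in zip(it, it)]
-- ===== Notes on version B (the rewrite author's own statement) =====
-- stated objective: idiomatic
-- what changed: Replaced the enumerate+parity state machine carrying offset/length variables with direct pairwise grouping via zip over a single iterator, consuming two elements per step (zip truncation reproduces the odd-length drop).
import Mathlib
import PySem

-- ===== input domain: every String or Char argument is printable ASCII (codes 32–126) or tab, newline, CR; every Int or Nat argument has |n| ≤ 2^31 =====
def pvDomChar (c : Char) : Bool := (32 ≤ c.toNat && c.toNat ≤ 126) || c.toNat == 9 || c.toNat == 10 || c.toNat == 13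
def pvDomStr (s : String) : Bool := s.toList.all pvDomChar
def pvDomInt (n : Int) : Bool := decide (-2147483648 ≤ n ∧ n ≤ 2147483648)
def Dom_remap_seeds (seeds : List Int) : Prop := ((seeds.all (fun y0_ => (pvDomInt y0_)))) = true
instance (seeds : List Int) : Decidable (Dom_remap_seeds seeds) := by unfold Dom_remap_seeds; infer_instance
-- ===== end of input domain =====

-- B pairs consecutive elements directly (zip of one iterator with itself) instead of A's
-- enumerate+parity state machine; idiomatic, same cost, identical results.

-- ===== PORT A =====
-- enumerate-with-index loop carrying (result, offset, length); appends only on odd indices.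
def remap_seeds (seeds : List Int) : List (Int × Int) :=
  (((PySem.List.enumerate seeds 0).foldl
    (fun (st : List (Int × Int) × Int × Int) (p : Int × Int) =>
      if p.1 % 2 == 0 then (st.1, p.2, st.2.2)
      else (st.1 ++ [(st.2.1, p.2)], st.2.1, p.2))
    ([], 0, 0)).1)

-- ===== PORT B =====
-- structural recursion two elements at a time (the zip(it, it) pairing)
def remap_seeds_alt : List Int → List (Int × Int)
  | a :: b :: rest => (a, b) :: remap_seeds_alt rest
  | _ => []

-- ===== PRECONDITION & SPEC =====
def Spec_remap_seeds (seeds : List Int) (out : List (Int × Int)) : Prop := out = remap_seeds_alt seeds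
instance (seeds : List Int) (out : List (Int × Int)) : Decidable (Spec_remap_seeds seeds out) := by unfold Spec_remap_seeds; infer_instance

-- ===== CLAIM (what is proved, stated in full; the proofs are below) =====
def Claim_equal_remap_seeds : Prop := ∀ (seeds : List Int), Dom_remap_seeds seeds → Spec_remap_seeds seeds (remap_seeds seeds)

-- ===== LEMMAS AND PROOFS =====

-- Loop invariant: starting at an even index k with accumulator acc, A's fold produces
-- acc ++ the pairwise grouping, regardless of the carried offset/length state.
theorem remap_loop_even (seeds : List Int) :
    ∀ (k : Int), k % 2 = 0 → ∀ (acc : List (Int × Int)) (off len : Int),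
    ((PySem.List.enumerate seeds k).foldl
      (fun (st : List (Int × Int) × Int × Int) (p : Int × Int) =>
        if p.1 % 2 == 0 then (st.1, p.2, st.2.2)
        else (st.1 ++ [(st.2.1, p.2)], st.2.1, p.2))
      (acc, off, len)).1 = acc ++ remap_seeds_alt seeds := by
  induction seeds using remap_seeds_alt.induct with
  | case1 a b rest ih =>
    intro k hk acc off len
    simp only [PySem.List.enumerate_cons, List.foldl_cons, remap_seeds_alt]
    have h1 : (k % 2 == 0) = true := by simpa using hk
    have h2 : ((k + 1) % 2 == 0) = false := by
      simp only [beq_eq_false_iff_ne, ne_eq]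
      omega
    simp only [h1, h2, reduceIte]
    rw [if_neg (by simp)]
    rw [ih (k + 1 + 1) (by omega) (acc ++ [(a, b)]) a b]
    simp
  | case2 xs hne =>
    intro k hk acc off len
    match xs, hne with
    | [], _ =>
      simp [PySem.List.enumerate_nil, remap_seeds_alt]
    | [a], _ =>
      have h1 : (2 : Int) ∣ k := Int.dvd_of_emod_eq_zero hk
      simp [PySem.List.enumerate_cons, PySem.List.enumerate_nil, h1, remap_seeds_alt]
    | a :: b :: rest, hne => exact (hne a b rest rfl).elim

-- ===== VERDICT (by name: the statement is the Claim_ definition above) =====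
theorem remap_seeds_spec : Claim_equal_remap_seeds := by
  intro seeds _
  unfold Spec_remap_seeds remap_seeds
  rw [remap_loop_even seeds 0 rfl [] 0 0]
  simp
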